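-- pv_equiv track=rewrite | github.com/mrjohnsonloomis/cl_cs | 3 my_code/exercises/2_1_solutions.py | analyze_temperatures
-- ===== SOURCE A (Python) =====
-- def analyze_temperatures(temperatures):
--     # Find highest and lowest temperatures
--     highest = temperatures[0]  # Start with first temperature
--     lowest = temperatures[0]   # Start with first temperature
--     hot_days = 0
--
--     for temp in temperatures:
--         # Check if this is highest or lowest
--         if temp > highest:
--             highest = temp
--         if temp < lowest:
--             lowest = temp
--
--         # Count hot days
--         if temp > 30:
--             hot_days = hot_days + 1
--
--     return highest, lowest, hot_days
-- ===== SOURCE B (Python) =====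
-- def analyze_temperatures(temperatures):
--     # Three independent reductions instead of one fused loop.
--     highest = max(temperatures)
--     lowest = min(temperatures)
--     hot_days = sum(1 for t in temperatures if t > 30)
--     return highest, lowest, hot_days
-- ===== Notes on version B (the rewrite author's own statement) =====
-- stated objective: idiomatic
-- what changed: Replaces the single fused accumulator loop with three independent standard-library reductions: max, min, and a conditional sum.
import Mathlib
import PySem

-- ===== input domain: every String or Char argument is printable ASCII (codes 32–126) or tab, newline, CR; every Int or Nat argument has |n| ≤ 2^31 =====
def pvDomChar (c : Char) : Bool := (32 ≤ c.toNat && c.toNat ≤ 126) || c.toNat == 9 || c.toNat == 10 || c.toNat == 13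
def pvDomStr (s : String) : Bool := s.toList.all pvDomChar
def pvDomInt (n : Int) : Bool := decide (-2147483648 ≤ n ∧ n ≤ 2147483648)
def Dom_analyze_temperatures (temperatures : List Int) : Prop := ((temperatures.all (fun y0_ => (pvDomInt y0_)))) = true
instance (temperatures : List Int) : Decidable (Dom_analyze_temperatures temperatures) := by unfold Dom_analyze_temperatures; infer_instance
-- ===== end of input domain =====

-- B computes the three results with separate standard reductions (max, min, conditional count)
-- instead of A's one fused accumulator loop; same O(n) cost, more idiomatic.
-- Pre_ excludes the empty list, on which A raises IndexError (and B raises ValueError).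


-- ===== PORT A =====
-- temperatures[0] is PySem.List.pyGet?; the none branch is unreachable under Pre_.
def analyze_temperatures (temperatures : List Int) : Int × Int × Int :=
  match PySem.List.pyGet? temperatures 0 with
  | none => (0, 0, 0)
  | some first =>
    let r := temperatures.foldl
      (fun (s : Int × Int × Int) temp =>
        let highest := if temp > s.1 then temp else s.1
        let lowest := if temp < s.2.1 then temp else s.2.1
        let hot_days := if temp > 30 then s.2.2 + 1 else s.2.2
        (highest, lowest, hot_days))
      (first, first, 0)
    r

-- ===== PORT B =====
-- max(xs)/min(xs) are PySem.List.max?/min? (none = ValueError, unreachable under Pre_);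
-- the 0/1 generator sum is a countP.
def analyze_temperatures_alt (temperatures : List Int) : Int × Int × Int :=
  ((PySem.List.max? temperatures (fun y => y)).getD 0,
   (PySem.List.min? temperatures (fun y => y)).getD 0,
   ((temperatures.countP (fun t => decide (t > 30)) : Nat) : Int))

-- ===== PRECONDITION & SPEC =====
-- Pre_ excludes the empty list, on which A raises IndexError.
def Pre_analyze_temperatures (temperatures : List Int) : Prop := temperatures ≠ []
instance (temperatures : List Int) : Decidable (Pre_analyze_temperatures temperatures) := by unfold Pre_analyze_temperatures; infer_instance
def pvWitness_analyze_temperatures : List Int := [31, -4, 12]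

def Spec_analyze_temperatures (temperatures : List Int) (out : Int × Int × Int) : Prop := out = analyze_temperatures_alt temperatures
instance (temperatures : List Int) (out : Int × Int × Int) : Decidable (Spec_analyze_temperatures temperatures out) := by unfold Spec_analyze_temperatures; infer_instance

-- ===== CLAIM (what is proved, stated in full; the proofs are below) =====
def Claim_equal_analyze_temperatures : Prop := ∀ (temperatures : List Int), Dom_analyze_temperatures temperatures → Pre_analyze_temperatures temperatures → Spec_analyze_temperatures temperatures (analyze_temperatures temperatures)

-- ===== LEMMAS AND PROOFS =====

-- A's fused loop splits into a running max, a running min, and a count.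
lemma fold_split (l : List Int) (h lo c : Int) :
    l.foldl
      (fun (s : Int × Int × Int) temp =>
        let highest := if temp > s.1 then temp else s.1
        let lowest := if temp < s.2.1 then temp else s.2.1
        let hot_days := if temp > 30 then s.2.2 + 1 else s.2.2
        (highest, lowest, hot_days))
      (h, lo, c)
    = (l.foldl max h, l.foldl min lo, c + ((l.countP (fun t => decide (t > 30)) : Nat) : Int)) := by
  induction l generalizing h lo c with
  | nil => simp
  | cons x t ih =>
    simp only [List.foldl_cons, List.countP_cons, ih, Prod.mk.injEq]
    have hmx : (if x > h then x else h) = max h x := by rw [max_def]; split_ifs <;> omega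
    have hmn : (if x < lo then x else lo) = min lo x := by rw [min_def]; split_ifs <;> omega
    refine ⟨by rw [hmx], by rw [hmn], ?_⟩
    by_cases hx : x > 30 <;> simp [hx] <;> push_cast <;> ring

-- ===== VERDICT (by name: the statement is the Claim_ definition above) =====
theorem analyze_temperatures_spec : Claim_equal_analyze_temperatures := by
  intro temps _ hpre
  cases temps with
  | nil => exact absurd rfl hpre
  | cons x t =>
    show analyze_temperatures (x :: t) = analyze_temperatures_alt (x :: t)
    simp only [analyze_temperatures, analyze_temperatures_alt,
      PySem.List.max?_id_cons, PySem.List.min?_id_cons, Option.getD_some]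
    simp only [PySem.List.pyGet?, PySem.List.pyIdx?]
    simp [fold_split]
    by_cases hx : x > 30 <;> simp [List.countP_cons, hx] <;> push_cast <;> ring
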